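-- pv_equiv track=rewrite | github.com/cocoacolar/TIL | python/0819/카카오_신규아이디추천.py | solution
-- ===== SOURCE A (Python) =====
-- def solution(new_id):
--     answer = new_id.lower()
--     test = [
--     'a', 'b', 'c', 'd', 'e', 'f', 'g', 'h',
--     'i', 'j', 'k', 'l', 'm', 'n', 'o', 'p',
--     'q', 'r', 's', 't', 'u', 'v', 'w', 'x',
--     'y', 'z', '0', '1', '2', '3', '4', '5',
--     '6', '7', '8', '9', '-', '_', '.'
--     ]
--
--     test_name = answer
--     for i in answer:
--         if i not in test:
--             test_name = test_name.replace(i, '', 1)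
--
--     answer = test_name
--
--
--     test_name = answer
--     stack = []
--     for j in test_name:
--         if not stack:
--             stack.append(j)
--         else:
--             x = stack.pop()
--             if x == '.' and j == '.':
--                 stack.append(j)
--             elif x == '.' and j != '.':
--                 stack.append(x)
--                 stack.append(j)
--             elif x != '.' :
--                 stack.append(x)
--                 stack.append(j)
--     answer = ''
--     for k in stack:
--         answer += k
--
--
--     while answer[0] =='.' or answer[-1] == '.':
--         if len(answer) == 1:
--             answer = ''
--             break
--         if answer[0] =='.':
--             answer = answer[1:]
--         elif answer[-1] == '.':
--             answer = answer[:-1]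
--
--     if not answer:
--         answer += 'a'
--     else:
--         if len(answer) >15:
--             answer = answer[:15]
--             while answer[0] =='.' or answer[-1] == '.':
--                 if len(answer) == 1:
--                     answer = ''
--                     break
--                 if answer[0] =='.':
--                     answer = answer[1:]
--                 elif answer[-1] == '.':
--                     answer = answer[:-1]
--
--     if len(answer) <=2:
--         while len(answer) != 3:
--             answer += answer[-1]
--
--
--
--     return answer
-- ===== SOURCE B (Python) =====
-- ALLOWED = set('abcdefghijklmnopqrstuvwxyz0123456789-_.')
--
-- def solution(new_id):
--     out = []
--     for c in new_id.lower():
--         if c in ALLOWED and not (c == '.' and out and out[-1] == '.'):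
--             out.append(c)
--     s = ''.join(out).strip('.')
--     if not s:
--         s = 'a'
--     s = s[:15].strip('.')
--     return s + s[-1] * (3 - len(s))
-- ===== Notes on version B (the rewrite author's own statement) =====
-- stated objective: faster
-- what changed: A cleans the id in three passes (a count-limited replace call per invalid character, a pop/push stack to collapse dots, and hand-written while-loops for stripping and padding); B filters and collapses dots in one linear pass over the lowercased string and finishes with a dot-strip, a slice and last-character padding.
import Mathlib
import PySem

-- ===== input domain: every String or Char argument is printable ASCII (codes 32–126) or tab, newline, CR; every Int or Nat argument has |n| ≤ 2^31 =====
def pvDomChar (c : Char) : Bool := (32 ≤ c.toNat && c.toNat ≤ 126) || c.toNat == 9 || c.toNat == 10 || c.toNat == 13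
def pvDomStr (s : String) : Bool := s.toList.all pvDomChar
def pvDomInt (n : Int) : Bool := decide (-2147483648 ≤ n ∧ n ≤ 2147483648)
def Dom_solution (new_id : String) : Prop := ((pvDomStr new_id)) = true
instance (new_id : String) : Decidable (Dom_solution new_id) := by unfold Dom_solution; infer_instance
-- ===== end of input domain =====

-- B replaces A's three-pass cleaning (quadratic one-at-a-time replace() deletions, a pop/push stack pass,
-- and hand-written while-loops for stripping and padding) by a single filter-and-collapse pass plus
-- a dot-strip, a slice and last-character padding; objective: faster (and shorter).

-- ===== PORT A =====
def testList : List Char :=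
  ['a','b','c','d','e','f','g','h','i','j','k','l','m','n','o','p','q','r','s','t','u','v','w','x','y','z',
   '0','1','2','3','4','5','6','7','8','9','-','_','.']

-- test_name.replace(i, '', 1) for a single-character pattern i: delete the first occurrence of i (exact)
def pyRemoveFirst (c : Char) : List Char → List Char
  | [] => []
  | x :: xs => if x = c then xs else x :: pyRemoveFirst c xs

-- one iteration of A's stack loop (the stack's top is the list's last element, as in the Python list)
def stackStep (stack : List Char) (j : Char) : List Char :=
  if stack = [] then stack ++ [j]
  else
    let x := stack.getLastD ' '        -- x = stack.pop(); the stack is nonempty here, the default is never read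
    let s' := stack.dropLast
    if x = '.' ∧ j = '.' then s' ++ [j]
    else if x = '.' ∧ j ≠ '.' then s' ++ [x] ++ [j]
    else if x ≠ '.' then s' ++ [x] ++ [j]
    else s'

-- A's two identical "while answer[0] == '.' or answer[-1] == '.'" loops.
-- The [] case is where Python raises IndexError on entry (excluded by Pre_); inside the loop the string is never empty.
def stripLoop : List Char → List Char
  | [] => []
  | a :: rest =>
    if a = '.' ∨ (a :: rest).getLastD ' ' = '.' then
      if (a :: rest).length = 1 then []
      else if a = '.' then stripLoop rest
      else stripLoop ((a :: rest).dropLast)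
    else a :: rest
termination_by l => l.length
decreasing_by all_goals (simp only [List.length_dropLast, List.length_cons]; omega)

-- "while len(answer) != 3: answer += answer[-1]"; it is entered only with 1 ≤ len ≤ 2, so the
-- guard len < 3 is Python's len != 3 on every reachable input, and the getLastD default is never read.
def padWhile (ans : List Char) : List Char :=
  if ans.length < 3 then padWhile (ans ++ [ans.getLastD ' '])
  else ans
termination_by 3 - ans.length
decreasing_by simp; omega

def solution (new_id : String) : String :=
  let answer := (PySem.Str.lower new_id).toList
  let test_name := answer.foldl (fun t i => if testList.contains i then t else pyRemoveFirst i t) answer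
  let stack := test_name.foldl stackStep []
  let answer2 := stack.foldl (fun acc k => acc ++ [k]) []   -- answer = ''; for k in stack: answer += k
  let answer3 := stripLoop answer2
  let answer4 :=
    if answer3 = [] then answer3 ++ ['a']
    else if 15 < answer3.length then stripLoop (PySem.List.slice answer3 none (some 15))
    else answer3
  let answer5 := if answer4.length ≤ 2 then padWhile answer4 else answer4
  String.mk answer5

-- ===== PORT B =====
def allowedSet : PySem.Set Char := PySem.Set.ofList "abcdefghijklmnopqrstuvwxyz0123456789-_.".toList

def solution_alt (new_id : String) : String :=
  let out := (PySem.Str.lower new_id).toList.foldl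
    (fun out c =>
      if allowedSet.contains c && !(c == '.' && !out.isEmpty && out.getLastD ' ' == '.')
      then out ++ [c] else out) []
  let s0 := PySem.Chars.stripChars out ['.']
  let s1 := if s0 = [] then ['a'] else s0
  let s2 := PySem.Chars.stripChars (PySem.List.slice s1 none (some 15)) ['.']
  -- s[-1]: s2 is never empty (proved below), so the .getD default is never read
  String.mk (s2 ++ PySem.List.pyRepeat [(PySem.List.pyGet? s2 (-1)).getD 'a'] (3 - s2.length))

-- ===== PRECONDITION & SPEC =====
-- Pre_ excludes exactly the inputs on which A raises IndexError: those whose lowercasing contains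
-- no allowed character at all, so that the cleaned string is empty when A first indexes answer[0].
def Pre_solution (new_id : String) : Prop :=
  (PySem.Chars.lower new_id.toList).any
    (fun c => "abcdefghijklmnopqrstuvwxyz0123456789-_.".toList.contains c) = true
instance (new_id : String) : Decidable (Pre_solution new_id) := by unfold Pre_solution; infer_instance

def pvWitness_solution : String := "abc"

def Spec_solution (new_id : String) (out : String) : Prop := out = solution_alt new_id
instance (new_id : String) (out : String) : Decidable (Spec_solution new_id out) := by unfold Spec_solution; infer_instance

-- ===== CLAIM (what is proved, stated in full; the proofs are below) =====
def Claim_equal_solution : Prop := ∀ (new_id : String), Dom_solution new_id → Pre_solution new_id → Spec_solution new_id (solution new_id)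
-- ===== LEMMAS AND PROOFS =====

-- B's dot-collapsing part of the loop body, isolated for the proofs
def collapseStep (out : List Char) (c : Char) : List Char :=
  if c == '.' && !out.isEmpty && out.getLastD ' ' == '.' then out else out ++ [c]

theorem pyRemoveFirst_append (c : Char) (p r : List Char) (hp : c ∉ p) :
    pyRemoveFirst c (p ++ c :: r) = p ++ r := by
  induction p with
  | nil => simp [pyRemoveFirst]
  | cons x xs ih =>
      simp only [List.mem_cons, not_or] at hp
      simp [pyRemoveFirst, Ne.symm hp.1, ih hp.2]

theorem filter_fold (s p : List Char) (hp : ∀ c ∈ p, testList.contains c = true) :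
    s.foldl (fun t i => if testList.contains i then t else pyRemoveFirst i t) (p ++ s)
      = p ++ s.filter (fun c => testList.contains c) := by
  induction s generalizing p with
  | nil => simp
  | cons i s' ih =>
      by_cases h : testList.contains i = true
      · have hp' : ∀ c ∈ p ++ [i], testList.contains c = true := by
          intro c hc
          rcases List.mem_append.1 hc with h' | h'
          · exact hp c h'
          · simp at h'; subst h'; exact h
        rw [List.foldl_cons, if_pos h, show p ++ i :: s' = (p ++ [i]) ++ s' by simp, ih _ hp']
        have h' : i ∈ testList := by simpa using h
        simp [List.filter_cons, h']
      · rw [List.foldl_cons, if_neg h, pyRemoveFirst_append i p s' (fun hip => h (hp i hip)), ih p hp]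
        have h' : i ∉ testList := by simpa using h
        simp [List.filter_cons, h']

theorem stackStep_eq_collapseStep : stackStep = collapseStep := by
  funext acc j
  rcases List.eq_nil_or_concat acc with rfl | ⟨q, x, rfl⟩
  · simp [stackStep, collapseStep]
  · simp only [stackStep, collapseStep, List.concat_eq_append]
    have hne : q ++ [x] ≠ [] := by simp
    rw [if_neg hne]
    simp only [List.getLastD_concat, List.dropLast_concat]
    by_cases hx : x = '.'
    · by_cases hj : j = '.'
      · subst hx hj; simp
      · simp [hx, hj]
    · simp [hx]

theorem collapse_ne_nil (s acc : List Char) (h : acc ≠ []) :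
    s.foldl collapseStep acc ≠ [] := by
  induction s generalizing acc with
  | nil => simpa
  | cons c s' ih =>
      simp only [List.foldl_cons]
      apply ih
      unfold collapseStep
      split <;> simp [h]

theorem collapse_cons_ne_nil (c : Char) (s : List Char) :
    (c :: s).foldl collapseStep [] ≠ [] := by
  simp only [List.foldl_cons]
  exact collapse_ne_nil s _ (by simp [collapseStep])

-- dropping a leading dot
theorem stripChars_cons_dot (r : List Char) :
    PySem.Chars.stripChars ('.' :: r) ['.'] = PySem.Chars.stripChars r ['.'] := by
  simp [PySem.Chars.stripChars, List.dropWhile]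

-- dropping a trailing dot
theorem stripChars_concat_dot (q : List Char) :
    PySem.Chars.stripChars (q ++ ['.']) ['.'] = PySem.Chars.stripChars q ['.'] := by
  simp only [PySem.Chars.stripChars]
  rw [List.dropWhile_append]
  by_cases h : (q.dropWhile (fun c => (['.'] : List Char).contains c)).isEmpty = true
  · rw [if_pos h]
    rw [List.isEmpty_iff] at h
    rw [h]
    simp [List.dropWhile]
  · rw [if_neg h, List.reverse_append]
    simp only [List.reverse_cons, List.reverse_nil, List.nil_append, List.singleton_append]
    rw [List.dropWhile_cons_of_pos (by simp)]

-- a string with non-dot ends is unchanged by strip('.')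
theorem stripChars_id (l : List Char) (hl : l ≠ [])
    (h1 : l.headD ' ' ≠ '.') (h2 : l.getLastD ' ' ≠ '.') :
    PySem.Chars.stripChars l ['.'] = l := by
  rcases l with _ | ⟨a, rest⟩
  · simp at hl
  · simp only [List.headD_cons] at h1
    have hdrop : (a :: rest).dropWhile (fun c => (['.'] : List Char).contains c) = a :: rest := by
      rw [List.dropWhile_cons_of_neg]; simp [h1]
    simp only [PySem.Chars.stripChars, hdrop]
    rcases List.eq_nil_or_concat (a :: rest) with h | ⟨q, x, hqx⟩
    · simp at h
    · rw [List.concat_eq_append] at hqx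
      rw [hqx]
      have hx : x ≠ '.' := by
        rw [hqx] at h2; simpa [List.getLastD_concat] using h2
      rw [List.reverse_append, List.reverse_cons, List.reverse_nil, List.nil_append,
        List.singleton_append, List.dropWhile_cons_of_neg (by simp [hx])]
      simp

theorem stripLoop_nil : stripLoop [] = [] := by rw [stripLoop]

theorem stripLoop_cons (a : Char) (rest : List Char) :
    stripLoop (a :: rest) =
      if a = '.' ∨ (a :: rest).getLastD ' ' = '.' then
        if (a :: rest).length = 1 then []
        else if a = '.' then stripLoop rest
        else stripLoop ((a :: rest).dropLast)
      else a :: rest := by rw [stripLoop]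

theorem stripLoop_eq_stripChars : ∀ l : List Char, l ≠ [] →
    stripLoop l = PySem.Chars.stripChars l ['.'] := by
  intro l
  induction l using stripLoop.induct with
  | case1 => intro h; simp at h
  | case2 a rest hcond hlen =>
      intro _
      have hone : rest = [] := by simpa using hlen
      subst hone
      have ha : a = '.' := by
        rcases hcond with h | h
        · exact h
        · simpa using h
      subst ha
      rw [stripLoop_cons]; simp
      simp [PySem.Chars.stripChars, List.dropWhile]
  | case3 rest hcond hlen ih =>
      intro _
      have hrest : rest ≠ [] := by intro h; subst h; simp at hlen
      rw [show stripLoop ('.' :: rest) = stripLoop rest by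
            rw [stripLoop_cons, if_pos hcond, if_neg hlen, if_pos rfl]]
      rw [ih hrest, stripChars_cons_dot]
  | case4 a rest hcond hlen ha ih =>
      intro _
      have hlast : (a :: rest).getLastD ' ' = '.' := by
        rcases hcond with h | h
        · exact absurd h ha
        · exact h
      rcases List.eq_nil_or_concat (a :: rest) with h | ⟨q, x, hqx⟩
      · simp at h
      · rw [List.concat_eq_append] at hqx
        have hx : x = '.' := by rw [hqx] at hlast; simpa [List.getLastD_concat] using hlast
        subst hx
        have hq : q ≠ [] := by
          intro h0
          rw [h0] at hqx; simp at hqx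
          exact ha hqx.1
        have hdl : (a :: rest).dropLast = q := by rw [hqx, List.dropLast_concat]
        rw [show stripLoop (a :: rest) = stripLoop ((a :: rest).dropLast) by
              rw [stripLoop_cons, if_pos hcond, if_neg hlen, if_neg ha]]
        rw [hdl] at ih ⊢
        rw [ih hq]
        conv_rhs => rw [hqx]
        rw [stripChars_concat_dot]
  | case5 a rest hcond =>
      intro _
      rw [show stripLoop (a :: rest) = a :: rest by rw [stripLoop_cons, if_neg hcond]]
      push_neg at hcond
      exact (stripChars_id (a :: rest) (by simp) (by simpa using hcond.1) hcond.2).symm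

-- the strip loop never empties a string whose first character is not a dot
theorem stripLoop_ne_nil : ∀ l : List Char, l ≠ [] → l.headD ' ' ≠ '.' → stripLoop l ≠ [] := by
  intro l
  induction l using stripLoop.induct with
  | case1 => intro h _; simp at h
  | case2 a rest hcond hlen =>
      intro _ h1
      have hone : rest = [] := by simpa using hlen
      subst hone
      simp only [List.headD_cons] at h1
      rcases hcond with h | h
      · exact absurd h h1
      · exact absurd (by simpa using h) h1
  | case3 rest hcond hlen ih => intro _ h1; simp at h1
  | case4 a rest hcond hlen ha ih =>
      intro _ h1
      rw [show stripLoop (a :: rest) = stripLoop ((a :: rest).dropLast) by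
            rw [stripLoop_cons, if_pos hcond, if_neg hlen, if_neg ha]]
      have hrest : rest ≠ [] := by intro h; subst h; simp at hlen
      have hdl : (a :: rest).dropLast = a :: rest.dropLast := by
        rcases rest with _ | ⟨b, t⟩
        · simp at hrest
        · simp
      rw [hdl] at ih ⊢
      exact ih (by simp) (by simpa using h1)
  | case5 a rest hcond =>
      intro _ _
      rw [show stripLoop (a :: rest) = a :: rest by rw [stripLoop_cons, if_neg hcond]]
      simp

-- ends of the strip loop output are never dots
theorem stripLoop_ends : ∀ l : List Char,
    stripLoop l = [] ∨ ((stripLoop l).headD ' ' ≠ '.' ∧ (stripLoop l).getLastD ' ' ≠ '.') := by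
  intro l
  induction l using stripLoop.induct with
  | case1 => left; exact stripLoop_nil
  | case2 a rest hcond hlen =>
      left
      rw [stripLoop_cons, if_pos hcond, if_pos hlen]
  | case3 rest hcond hlen ih =>
      rw [show stripLoop ('.' :: rest) = stripLoop rest by
            rw [stripLoop_cons, if_pos hcond, if_neg hlen, if_pos rfl]]
      exact ih
  | case4 a rest hcond hlen ha ih =>
      rw [show stripLoop (a :: rest) = stripLoop ((a :: rest).dropLast) by
            rw [stripLoop_cons, if_pos hcond, if_neg hlen, if_neg ha]]
      exact ih
  | case5 a rest hcond =>
      rw [show stripLoop (a :: rest) = a :: rest by rw [stripLoop_cons, if_neg hcond]]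
      push_neg at hcond
      right
      exact ⟨by simpa using hcond.1, hcond.2⟩

-- A's padding step equals B's "s + s[-1] * (3 - len(s))" on every nonempty string
theorem padWhile_big (x : List Char) (h : ¬ x.length < 3) : padWhile x = x := by
  rw [padWhile, if_neg h]

theorem pad_one (ch : Char) : padWhile [ch] = [ch, ch, ch] := by
  rw [padWhile, if_pos (by simp)]
  rw [show ([ch] ++ [List.getLastD [ch] ' ']) = [ch, ch] by simp]
  rw [padWhile, if_pos (by simp)]
  rw [show ([ch, ch] ++ [List.getLastD [ch, ch] ' ']) = [ch, ch, ch] by simp]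
  exact padWhile_big _ (by simp)

theorem pad_two (a b : Char) : padWhile [a, b] = [a, b, b] := by
  rw [padWhile, if_pos (by simp)]
  rw [show ([a, b] ++ [List.getLastD [a, b] ' ']) = [a, b, b] by simp]
  exact padWhile_big _ (by simp)

theorem pad_eq (x : List Char) (hx : x ≠ []) :
    (if x.length ≤ 2 then padWhile x else x)
      = x ++ PySem.List.pyRepeat [(PySem.List.pyGet? x (-1)).getD 'a'] (3 - (x.length : Int)) := by
  rcases x with _ | ⟨a, rest⟩
  · simp at hx
  · rcases rest with _ | ⟨b, rest2⟩
    · rw [if_pos (by simp), pad_one]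
      simp [PySem.List.pyRepeat_singleton, PySem.List.pyGet?, PySem.List.pyIdx?]
    · rcases rest2 with _ | ⟨c, rest3⟩
      · rw [if_pos (by simp), pad_two]
        simp [PySem.List.pyRepeat_singleton, PySem.List.pyGet?, PySem.List.pyIdx?]
      · have h3 : ¬ (a :: b :: c :: rest3).length ≤ 2 := by simp
        rw [if_neg h3]
        have h0 : (3 - ((a :: b :: c :: rest3).length : Int)).toNat = 0 := by
          simp; omega
        rw [PySem.List.pyRepeat_singleton, h0]
        simp

theorem allowedSet_eq : (allowedSet : List Char) = testList := by decide

theorem allowedStr_eq : "abcdefghijklmnopqrstuvwxyz0123456789-_.".toList = testList := by decide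

-- B's loop body = (allowed-filter) + dot-collapse
theorem bstep_eq (out : List Char) (c : Char) :
    (if allowedSet.contains c && !(c == '.' && !out.isEmpty && out.getLastD ' ' == '.')
     then out ++ [c] else out)
      = if testList.contains c then collapseStep out c else out := by
  rw [show PySem.Set.contains allowedSet c = testList.contains c by rw [← allowedSet_eq]; rfl]
  unfold collapseStep
  cases h : testList.contains c <;> cases h2 : (c == '.' && !out.isEmpty && out.getLastD ' ' == '.') <;> simp [h, h2]

-- ===== VERDICT (by name: the statement is the Claim_ definition above) =====
theorem solution_spec : Claim_equal_solution := by
  intro new_id _ hpre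
  unfold Spec_solution
  simp only [solution, solution_alt]
  simp only [stackStep_eq_collapseStep, bstep_eq, PySem.List.foldl_if_eq_foldl_filter,
    PySem.List.foldl_append_singleton_eq_self, List.nil_append]
  have hA := filter_fold ((PySem.Str.lower new_id).toList) [] (by simp)
  simp only [List.nil_append] at hA
  rw [hA]
  set L := (PySem.Str.lower new_id).toList with hL
  set F := L.filter (fun c => testList.contains c) with hFdef
  have hF : F ≠ [] := by
    unfold Pre_solution at hpre
    rw [List.any_eq_true] at hpre
    obtain ⟨c, hc, hc2⟩ := hpre
    have hcL : c ∈ L := by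
      rw [hL, PySem.Str.toList_lower]; exact hc
    have hct : testList.contains c = true := by
      rw [← allowedStr_eq]; exact hc2
    intro h0
    rw [hFdef, List.filter_eq_nil_iff] at h0
    exact h0 c hcL hct
  set C := F.foldl collapseStep [] with hCdef
  have hC : C ≠ [] := by
    rcases F with _ | ⟨c, F'⟩
    · exact absurd rfl hF
    · exact collapse_cons_ne_nil c F'
  rw [← stripLoop_eq_stripChars C hC]
  set t := stripLoop C with htdef
  by_cases ht : t = []
  · rw [ht]
    norm_num [pad_one, PySem.List.slice_to]
    decide
  · rw [if_neg ht, if_neg ht]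
    obtain ⟨h1, h2⟩ := (stripLoop_ends C).resolve_left ht
    rw [← htdef] at h1 h2
    by_cases h15 : 15 < t.length
    · rw [if_pos h15, PySem.List.slice_to _ (by norm_num)]
      rw [show (15 : Int).toNat = 15 from rfl]
      have htake : (t.take 15) ≠ [] := by
        rw [Ne, List.take_eq_nil_iff]
        push_neg
        exact ⟨by norm_num, ht⟩
      have htakehead : (t.take 15).headD ' ' ≠ '.' := by
        rcases t with _ | ⟨a, r⟩
        · exact absurd rfl ht
        · simpa [List.take_cons] using h1
      have hne : PySem.Chars.stripChars (t.take 15) ['.'] ≠ [] := by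
        rw [← stripLoop_eq_stripChars _ htake]
        exact stripLoop_ne_nil _ htake htakehead
      rw [stripLoop_eq_stripChars _ htake]
      exact congrArg String.mk (pad_eq _ hne)
    · rw [if_neg h15, PySem.List.slice_to _ (by norm_num)]
      rw [show (15 : Int).toNat = 15 from rfl]
      rw [List.take_of_length_le (by omega), stripChars_id t ht h1 h2]
      exact congrArg String.mk (pad_eq t ht)
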